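-- pv_equiv track=rewrite | github.com/nbietry/AoC2024 | Python/Day7/day7.py | evaluate_expression_left_to_right
-- ===== SOURCE A (Python) =====
-- def evaluate_expression_left_to_right(expression):
--     tokens = expression.split()
--     result = int(tokens[0])
--     i = 1
--     while i < len(tokens):
--         operator = tokens[i]
--         number = int(tokens[i + 1])
--         match operator:
--             case '+': result += number
--             case '*': result *= number
--             case '||': result = int(str(result) + str(number))
--         i += 2
--     return result
-- ===== SOURCE B (Python) =====
-- def _apply(op, a, n):
--     if op == '+':
--         return a + n
--     if op == '*':
--         return a * n
--     if op == '||':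
--         return int(str(a) + str(n))
--     return a
--
--
-- def _compose(ps):
--     """Function computed by the pair list ps, built by divide and conquer:
--     function composition is associative, so the two halves can be built
--     independently and composed."""
--     if not ps:
--         return lambda a: a
--     if len(ps) == 1:
--         op, n = ps[0]
--         return lambda a: _apply(op, a, n)
--     mid = len(ps) // 2
--     f, g = _compose(ps[:mid]), _compose(ps[mid:])
--     return lambda a: g(f(a))
--
--
-- def evaluate_expression_left_to_right(expression):
--     tokens = expression.split()
--     start = int(tokens[0])
--     pairs = [(tokens[i], int(tokens[i + 1])) for i in range(1, len(tokens), 2)]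
--     return _compose(pairs)(start)
-- ===== Notes on version B (the rewrite author's own statement) =====
-- stated objective: alternative
-- what changed: Replaces A's accumulator while-loop with a divide-and-conquer evaluator: each (operator, number) pair becomes a closure Int->Int, the pair list is split recursively in halves and the two halves' closures are composed (correct because function composition is associative), and the single composed closure is applied once to int(tokens[0]).
import Mathlib
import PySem

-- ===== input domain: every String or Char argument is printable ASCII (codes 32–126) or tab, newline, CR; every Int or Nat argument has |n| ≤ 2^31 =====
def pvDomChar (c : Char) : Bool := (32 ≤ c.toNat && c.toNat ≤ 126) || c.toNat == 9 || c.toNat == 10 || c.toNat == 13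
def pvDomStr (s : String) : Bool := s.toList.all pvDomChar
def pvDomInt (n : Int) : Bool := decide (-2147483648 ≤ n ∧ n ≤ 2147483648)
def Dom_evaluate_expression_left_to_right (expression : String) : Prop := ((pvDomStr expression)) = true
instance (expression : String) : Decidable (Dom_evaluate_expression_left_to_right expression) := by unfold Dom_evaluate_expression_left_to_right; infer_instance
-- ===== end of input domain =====

-- B replaces A's accumulator loop by divide-and-conquer composition of per-pair closures
-- (function composition is associative); objective: alternative algorithm, same result.

-- ===== PORT A =====
-- int(str(result) + str(number)) — the '||' case; exact via PySem.Int.ofChars?/toChars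
def pvConcat (a n : Int) : Int :=
  (PySem.Int.ofChars? (PySem.Int.toChars a ++ PySem.Int.toChars n)).getD 0

-- the while-loop of A; where Python raises (IndexError/ValueError → none) the port
-- continues with the default "" / 0 — those inputs are excluded by Pre_ below
def pvALoop (tokens : List String) (i : Nat) (result : Int) : Int :=
  if i < tokens.length then
    let operator := (PySem.List.pyGet? tokens (i : Int)).getD ""
    let number := (PySem.Int.ofStr? ((PySem.List.pyGet? tokens ((i : Int) + 1)).getD "")).getD 0
    let result' :=
      if operator = "+" then result + number
      else if operator = "*" then result * number
      else if operator = "||" then pvConcat result number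
      else result
    pvALoop tokens (i + 2) result'
  else result
termination_by tokens.length - i

def evaluate_expression_left_to_right (expression : String) : Int :=
  let tokens := PySem.Str.split₀ expression
  let result := (PySem.Int.ofStr? ((PySem.List.pyGet? tokens 0).getD "")).getD 0
  pvALoop tokens 1 result

-- ===== PORT B =====
-- Source B's _apply: the if-chain applying one operator
def pvApply (op : String) (a n : Int) : Int :=
  if op = "+" then a + n
  else if op = "*" then a * n
  else if op = "||" then pvConcat a n
  else a

-- Source B's _compose: divide-and-conquer over the pair list; ps[:mid] / ps[mid:] with
-- 0 ≤ mid ≤ len are exactly List.take / List.drop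
def pvCompose (ps : List (String × Int)) : Int → Int :=
  if ps.length = 0 then fun a => a
  else if ps.length = 1 then
    let p := (PySem.List.pyGet? ps 0).getD ("", 0)
    fun a => pvApply p.1 a p.2
  else
    let mid := ps.length / 2
    let f := pvCompose (ps.take mid)
    let g := pvCompose (ps.drop mid)
    fun a => g (f a)
termination_by ps.length
decreasing_by
  · simpa using by omega
  · simpa using by omega

def evaluate_expression_left_to_right_alt (expression : String) : Int :=
  let tokens := PySem.Str.split₀ expression
  let start := (PySem.Int.ofStr? ((PySem.List.pyGet? tokens 0).getD "")).getD 0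
  let pairs := (PySem.List.pyRange 1 (tokens.length : Int) 2).map (fun i =>
    ((PySem.List.pyGet? tokens i).getD "",
     (PySem.Int.ofStr? ((PySem.List.pyGet? tokens (i + 1)).getD "")).getD 0))
  pvCompose pairs start

-- ===== PRECONDITION & SPEC =====
-- Pre_ = exactly the inputs where Python A returns: a nonempty odd-length token list,
-- int-parsable operands, and no concatenation operator applied to a negative operand
-- (there A's int(str(result) + str(number)) raises ValueError).
def Pre_evaluate_expression_left_to_right (expression : String) : Prop :=
  let tokens := PySem.Str.split₀ expression
  tokens ≠ [] ∧ tokens.length % 2 = 1 ∧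
  (PySem.Int.ofStr? (tokens.getD 0 "")).isSome = true ∧
  ∀ i ∈ List.range tokens.length, i % 2 = 1 →
    ((PySem.Int.ofStr? (tokens.getD (i + 1) "")).isSome = true ∧
     (tokens.getD i "" = "||" → 0 ≤ (PySem.Int.ofStr? (tokens.getD (i + 1) "")).getD 0))
instance (expression : String) : Decidable (Pre_evaluate_expression_left_to_right expression) := by
  unfold Pre_evaluate_expression_left_to_right; infer_instance

def pvWitness_evaluate_expression_left_to_right : String := "1 + 2 || 3"

def Spec_evaluate_expression_left_to_right (expression : String) (out : Int) : Prop := out = evaluate_expression_left_to_right_alt expression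
instance (expression : String) (out : Int) : Decidable (Spec_evaluate_expression_left_to_right expression out) := by unfold Spec_evaluate_expression_left_to_right; infer_instance

-- ===== CLAIM (what is proved, stated in full; the proofs are below) =====
def Claim_equal_evaluate_expression_left_to_right : Prop := ∀ (expression : String), Dom_evaluate_expression_left_to_right expression → Pre_evaluate_expression_left_to_right expression → Spec_evaluate_expression_left_to_right expression (evaluate_expression_left_to_right expression)

-- ===== LEMMAS AND PROOFS =====

-- step-2 range unrolls one element
lemma pyRange_two_cons (a b : Int) (h : a < b) :
    PySem.List.pyRange a b 2 = a :: PySem.List.pyRange (a + 2) b 2 := by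
  rw [PySem.List.pyRange_of_pos a b (by norm_num),
      PySem.List.pyRange_of_pos (a + 2) b (by norm_num)]
  have hn : (if a < b then ((b - a + 2 - 1) / 2).toNat else 0)
      = (if a + 2 < b then ((b - (a + 2) + 2 - 1) / 2).toNat else 0) + 1 := by
    split_ifs <;> omega
  rw [hn, List.range_succ_eq_map]
  simp only [List.map_cons, List.map_map]
  congr 1
  · simp
  · apply List.map_congr_left
    intro k _
    simp only [Function.comp_apply]
    push_cast
    ring

lemma pyRange_two_nil (a b : Int) (h : b ≤ a) : PySem.List.pyRange a b 2 = [] := by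
  rw [PySem.List.pyRange_of_pos a b (by norm_num)]
  rw [if_neg (by omega)]
  simp

-- A's loop from index i is the left fold of pvApply over the remaining pairs
lemma loop_eq_fold (tokens : List String) (i : Nat) (r : Int) :
    pvALoop tokens i r =
      ((PySem.List.pyRange (i : Int) (tokens.length : Int) 2).map (fun j =>
          ((PySem.List.pyGet? tokens j).getD "",
           (PySem.Int.ofStr? ((PySem.List.pyGet? tokens (j + 1)).getD "")).getD 0))).foldl
        (fun acc p => pvApply p.1 acc p.2) r := by
  by_cases h : i < tokens.length
  · rw [pvALoop, if_pos h]
    rw [pyRange_two_cons (i : Int) (tokens.length : Int) (by exact_mod_cast h)]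
    simp only [List.map_cons, List.foldl_cons]
    have : ((i : Int) + 2) = (((i + 2 : Nat)) : Int) := by push_cast; ring
    rw [this, loop_eq_fold tokens (i + 2)]
    rfl
  · rw [pvALoop, if_neg h]
    rw [pyRange_two_nil _ _ (by exact_mod_cast Nat.le_of_not_lt h)]
    simp
termination_by tokens.length - i

-- B's divide-and-conquer composition computes the same left fold
lemma compose_eq_foldl (ps : List (String × Int)) (a : Int) :
    pvCompose ps a = ps.foldl (fun acc p => pvApply p.1 acc p.2) a := by
  by_cases h0 : ps.length = 0
  · rw [pvCompose, if_pos h0]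
    rw [List.length_eq_zero_iff.mp h0]
    rfl
  · by_cases h1 : ps.length = 1
    · rw [pvCompose, if_neg h0, if_pos h1]
      obtain ⟨p, rfl⟩ := List.length_eq_one_iff.mp h1
      simp
    · rw [pvCompose, if_neg h0, if_neg h1]
      have hm : ps.length / 2 < ps.length := by omega
      have hl : (ps.take (ps.length / 2)).length < ps.length := by
        simp; omega
      have hr : (ps.drop (ps.length / 2)).length < ps.length := by
        simp; omega
      rw [compose_eq_foldl (ps.take (ps.length / 2)),
          compose_eq_foldl (ps.drop (ps.length / 2))]
      conv_rhs => rw [← List.take_append_drop (ps.length / 2) ps]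
      rw [List.foldl_append]
termination_by ps.length

-- ===== VERDICT (by name: the statement is the Claim_ definition above) =====
theorem evaluate_expression_left_to_right_spec : Claim_equal_evaluate_expression_left_to_right := by
  intro expression _ _
  unfold Spec_evaluate_expression_left_to_right
  unfold evaluate_expression_left_to_right evaluate_expression_left_to_right_alt
  rw [loop_eq_fold, compose_eq_foldl]
  norm_cast
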